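-- pv_equiv track=rewrite | github.com/cas1m1r/web-gdb | mi_parse.py | _split_top
-- ===== SOURCE A (Python) =====
-- def _split_top(s: str, sep: str = ","):
--     out = []
--     buf = []
--     depth = 0
--     in_str = False
--     esc = False
--     for ch in s:
--         if in_str:
--             buf.append(ch)
--             if esc:
--                 esc = False
--             elif ch == "\\":
--                 esc = True
--             elif ch == '"':
--                 in_str = False
--             continue
--
--         if ch == '"':
--             in_str = True
--             buf.append(ch)
--             continue
--
--         if ch in "{[":
--             depth += 1
--         elif ch in "}]":
--             depth -= 1
--
--         if ch == sep and depth == 0: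
--             out.append("".join(buf).strip())
--             buf = []
--         else:
--             buf.append(ch)
--
--     tail = "".join(buf).strip()
--     if tail:
--         out.append(tail)
--     return out
-- ===== SOURCE B (Python) =====
-- def _split_top(s: str, sep: str = ","):
--     # Recursive decomposition: repeatedly locate the next top-level separator
--     # with a fresh scanner and slice the string there; no character buffer.
--     def split_once(t):
--         depth = 0
--         in_str = False
--         esc = False
--         for i, ch in enumerate(t):
--             if in_str:
--                 if esc:
--                     esc = False
--                 elif ch == "\\":
--                     esc = True
--                 elif ch == '"':
--                     in_str = False
--             elif ch == '"':
--                 in_str = True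
--             else:
--                 if ch in "{[":
--                     depth += 1
--                 elif ch in "}]":
--                     depth -= 1
--                 if ch == sep and depth == 0:
--                     return t[:i], t[i + 1:]
--         return None
--
--     out = []
--     rest = s
--     while True:
--         cut = split_once(rest)
--         if cut is None:
--             tail = rest.strip()
--             if tail:
--                 out.append(tail)
--             return out
--         head, rest = cut
--         out.append(head.strip())
-- ===== Notes on version B (the rewrite author's own statement) =====
-- stated objective: alternative
-- what changed: A accumulates characters in a buffer inside one stateful loop; B instead repeatedly locates the next top-level separator with a fresh scanner helper, slices the string there, strips the slice directly, and recurses on the remainder (no character buffer, trailing-piece rule applied once at the end).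
import Mathlib
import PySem

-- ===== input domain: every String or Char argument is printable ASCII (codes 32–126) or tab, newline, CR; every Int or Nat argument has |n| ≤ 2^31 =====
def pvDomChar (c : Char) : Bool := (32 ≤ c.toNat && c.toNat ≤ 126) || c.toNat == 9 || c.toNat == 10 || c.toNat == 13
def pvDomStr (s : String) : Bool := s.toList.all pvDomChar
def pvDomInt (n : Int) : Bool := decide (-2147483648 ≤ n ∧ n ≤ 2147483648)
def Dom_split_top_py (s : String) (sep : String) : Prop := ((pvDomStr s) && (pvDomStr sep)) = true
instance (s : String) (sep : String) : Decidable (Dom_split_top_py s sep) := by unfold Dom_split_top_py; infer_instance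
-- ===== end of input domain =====

-- B replaces A's single buffer-accumulating loop by a recursive decomposition: find the next
-- top-level separator with a fresh scanner, slice there, recurse on the remainder (objective: alternative).


-- ===== PORT A =====
-- state: (out, buf, depth, in_str, esc); one fold over the characters, as in A
def pvStepA (sep : String) (acc : List String × List Char × Int × Bool × Bool) (ch : Char) :
    List String × List Char × Int × Bool × Bool :=
  let (out, buf, depth, in_str, esc) := acc
  if in_str then
    let buf := buf ++ [ch]
    if esc then (out, buf, depth, true, false)
    else if ch = '\\' then (out, buf, depth, true, true)
    else if ch = '"' then (out, buf, depth, false, esc)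
    else (out, buf, depth, true, esc)
  else if ch = '"' then (out, buf ++ [ch], depth, true, esc)
  else
    let depth := if ch = '{' ∨ ch = '[' then depth + 1
                 else if ch = '}' ∨ ch = ']' then depth - 1 else depth
    if String.mk [ch] = sep ∧ depth = 0 then
      (out ++ [PySem.Str.strip (String.mk buf)], [], depth, in_str, esc)
    else (out, buf ++ [ch], depth, in_str, esc)

def pvFinishA (out : List String) (buf : List Char) : List String :=
  let tail := PySem.Str.strip (String.mk buf)
  if tail ≠ "" then out ++ [tail] else out

def split_top_py (s : String) (sep : String) : List String :=
  let st := s.toList.foldl (pvStepA sep) ([], [], 0, false, false)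
  pvFinishA st.1 st.2.1

-- ===== PORT B =====
-- split_once: scan with fresh state, return (t[:i], t[i+1:]) at the first top-level separator
def pvSplitOnce (sep : String) (depth : Int) (in_str esc : Bool) :
    List Char → Option (List Char × List Char)
  | [] => none
  | ch :: t =>
    if in_str then
      if esc then (pvSplitOnce sep depth in_str false t).map (fun pr => (ch :: pr.1, pr.2))
      else if ch = '\\' then (pvSplitOnce sep depth in_str true t).map (fun pr => (ch :: pr.1, pr.2))
      else if ch = '"' then (pvSplitOnce sep depth false esc t).map (fun pr => (ch :: pr.1, pr.2))
      else (pvSplitOnce sep depth in_str esc t).map (fun pr => (ch :: pr.1, pr.2))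
    else if ch = '"' then
      (pvSplitOnce sep depth true esc t).map (fun pr => (ch :: pr.1, pr.2))
    else
      let depth' := if ch = '{' ∨ ch = '[' then depth + 1
                    else if ch = '}' ∨ ch = ']' then depth - 1 else depth
      if String.mk [ch] = sep ∧ depth' = 0 then some ([], t)
      else (pvSplitOnce sep depth' in_str esc t).map (fun pr => (ch :: pr.1, pr.2))

-- the while loop: accumulate stripped heads, tail rule when no cut remains
-- (fuel = rest.length makes the recursion structural; each cut strictly shortens rest,
--  so the fuel-0 branch is only reached with rest = [], where it coincides with the no-cut case)
def pvLoopB (sep : String) (out : List String) (rest : List Char) : Nat → List String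
  | 0 =>
    let tail := PySem.Str.strip (String.mk rest)
    if tail ≠ "" then out ++ [tail] else out
  | fuel + 1 =>
    match pvSplitOnce sep 0 false false rest with
    | none =>
      let tail := PySem.Str.strip (String.mk rest)
      if tail ≠ "" then out ++ [tail] else out
    | some (head, rest') => pvLoopB sep (out ++ [PySem.Str.strip (String.mk head)]) rest' fuel

def split_top_py_alt (s : String) (sep : String) : List String :=
  pvLoopB sep [] s.toList s.toList.length

-- ===== PRECONDITION & SPEC =====
def Spec_split_top_py (s : String) (sep : String) (out : List String) : Prop := out = split_top_py_alt s sep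
instance (s : String) (sep : String) (out : List String) : Decidable (Spec_split_top_py s sep out) := by unfold Spec_split_top_py; infer_instance

-- ===== CLAIM (what is proved, stated in full; the proofs are below) =====
def Claim_equal_split_top_py : Prop := ∀ (s : String) (sep : String), Dom_split_top_py s sep → Spec_split_top_py s sep (split_top_py s sep)

-- ===== LEMMAS AND PROOFS =====

theorem pvSplitOnce_length {sep : String} {d : Int} {i e : Bool} :
    ∀ {t : List Char} {p r : List Char}, pvSplitOnce sep d i e t = some (p, r) →
      r.length < t.length := by
  intro t
  induction t generalizing d i e with
  | nil => intro p r h; simp [pvSplitOnce] at h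
  | cons ch t ih =>
    intro p r h
    simp only [pvSplitOnce] at h
    split_ifs at h <;>
      first
        | (cases h; simp)
        | (rcases Option.map_eq_some_iff.mp h with ⟨⟨p', r'⟩, hg, he⟩
           cases he; exact Nat.lt_succ_of_lt (ih hg))


-- Main invariant: running A's loop from an arbitrary consistent state equals:
-- if B's scanner finds no cut, the tail rule on buf ++ cs; if it cuts at (p, r),
-- emit strip (buf ++ p) and continue A's loop from the reset state on r.
theorem pvLoopA_eq (sep : String) :
    ∀ (cs : List Char) (out : List String) (buf : List Char) (d : Int) (i e : Bool),
      (i = false → e = false) →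
      (let st := cs.foldl (pvStepA sep) (out, buf, d, i, e); pvFinishA st.1 st.2.1) =
        match pvSplitOnce sep d i e cs with
        | none => pvFinishA out (buf ++ cs)
        | some (p, r) =>
            (let st := r.foldl (pvStepA sep)
              (out ++ [PySem.Str.strip (String.mk (buf ++ p))], [], 0, false, false);
             pvFinishA st.1 st.2.1) := by
  intro cs
  induction cs with
  | nil => intro out buf d i e _; simp [pvSplitOnce]
  | cons ch t ih =>
    intro out buf d i e hc
    rw [List.foldl_cons]
    by_cases hi : i = true
    · subst hi
      by_cases he : e = true
      · subst he
        have hstep : pvStepA sep (out, buf, d, true, true) ch = (out, buf ++ [ch], d, true, false) := by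
          simp [pvStepA]
        have hsp : pvSplitOnce sep d true true (ch :: t)
            = (pvSplitOnce sep d true false t).map (fun pr => (ch :: pr.1, pr.2)) := by
          simp [pvSplitOnce]
        rw [hstep, hsp, ih out (buf ++ [ch]) d true false (fun h => nomatch h)]
        cases hg : pvSplitOnce sep d true false t <;> simp [List.append_assoc]
      · replace he : e = false := by simpa using he
        subst he
        by_cases hb : ch = '\\'
        · have hstep : pvStepA sep (out, buf, d, true, false) ch = (out, buf ++ [ch], d, true, true) := by
            simp [pvStepA, hb]
          have hsp : pvSplitOnce sep d true false (ch :: t)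
              = (pvSplitOnce sep d true true t).map (fun pr => (ch :: pr.1, pr.2)) := by
            simp [pvSplitOnce, hb]
          rw [hstep, hsp, ih out (buf ++ [ch]) d true true (fun h => nomatch h)]
          cases hg : pvSplitOnce sep d true true t <;> simp [List.append_assoc]
        · by_cases hq : ch = '"'
          · have hstep : pvStepA sep (out, buf, d, true, false) ch = (out, buf ++ [ch], d, false, false) := by
              simp [pvStepA, hb, hq]
            have hsp : pvSplitOnce sep d true false (ch :: t)
                = (pvSplitOnce sep d false false t).map (fun pr => (ch :: pr.1, pr.2)) := by
              simp [pvSplitOnce, hb, hq]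
            rw [hstep, hsp, ih out (buf ++ [ch]) d false false (fun _ => rfl)]
            cases hg : pvSplitOnce sep d false false t <;> simp [List.append_assoc]
          · have hstep : pvStepA sep (out, buf, d, true, false) ch = (out, buf ++ [ch], d, true, false) := by
              simp [pvStepA, hb, hq]
            have hsp : pvSplitOnce sep d true false (ch :: t)
                = (pvSplitOnce sep d true false t).map (fun pr => (ch :: pr.1, pr.2)) := by
              simp [pvSplitOnce, hb, hq]
            rw [hstep, hsp, ih out (buf ++ [ch]) d true false (fun h => nomatch h)]
            cases hg : pvSplitOnce sep d true false t <;> simp [List.append_assoc]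
    · replace hi : i = false := by simpa using hi
      subst hi
      have he : e = false := hc rfl
      subst he
      by_cases hq : ch = '"'
      · have hstep : pvStepA sep (out, buf, d, false, false) ch = (out, buf ++ [ch], d, true, false) := by
          simp [pvStepA, hq]
        have hsp : pvSplitOnce sep d false false (ch :: t)
            = (pvSplitOnce sep d true false t).map (fun pr => (ch :: pr.1, pr.2)) := by
          simp [pvSplitOnce, hq]
        rw [hstep, hsp, ih out (buf ++ [ch]) d true false (fun h => nomatch h)]
        cases hg : pvSplitOnce sep d true false t <;> simp [List.append_assoc]
      · by_cases hcut : String.mk [ch] = sep ∧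
            (if ch = '{' ∨ ch = '[' then d + 1 else if ch = '}' ∨ ch = ']' then d - 1 else d) = 0
        · have hstep : pvStepA sep (out, buf, d, false, false) ch
              = (out ++ [PySem.Str.strip (String.mk buf)], [], 0, false, false) := by
            simp only [pvStepA]
            rw [if_neg (by simp), if_neg hq, if_pos hcut, hcut.2]
          have hsp : pvSplitOnce sep d false false (ch :: t) = some ([], t) := by
            simp only [pvSplitOnce]
            rw [if_neg (by simp), if_neg hq, if_pos hcut]
          rw [hstep, hsp]
          simp
        · have hstep : pvStepA sep (out, buf, d, false, false) ch
              = (out, buf ++ [ch],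
                 (if ch = '{' ∨ ch = '[' then d + 1 else if ch = '}' ∨ ch = ']' then d - 1 else d),
                 false, false) := by
            simp only [pvStepA]
            rw [if_neg (by simp), if_neg hq, if_neg hcut]
          have hsp : pvSplitOnce sep d false false (ch :: t)
              = (pvSplitOnce sep
                  (if ch = '{' ∨ ch = '[' then d + 1 else if ch = '}' ∨ ch = ']' then d - 1 else d)
                  false false t).map (fun pr => (ch :: pr.1, pr.2)) := by
            simp only [pvSplitOnce]
            rw [if_neg (by simp), if_neg hq, if_neg hcut]
          rw [hstep, hsp,
            ih out (buf ++ [ch])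
              (if ch = '{' ∨ ch = '[' then d + 1 else if ch = '}' ∨ ch = ']' then d - 1 else d)
              false false (fun _ => rfl)]
          cases hg : pvSplitOnce sep
              (if ch = '{' ∨ ch = '[' then d + 1 else if ch = '}' ∨ ch = ']' then d - 1 else d)
              false false t <;> simp [List.append_assoc]

theorem pvLoopAB (sep : String) :
    ∀ (fuel : Nat) (cs : List Char) (out : List String), cs.length ≤ fuel →
      (let st := cs.foldl (pvStepA sep) (out, [], 0, false, false); pvFinishA st.1 st.2.1) =
        pvLoopB sep out cs fuel := by
  intro fuel
  induction fuel with
  | zero =>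
    intro cs out hlen
    have hnil : cs = [] := List.eq_nil_of_length_eq_zero (Nat.le_zero.mp hlen)
    subst hnil
    simp [pvLoopB, pvFinishA]
  | succ fuel ih =>
    intro cs out hlen
    rw [pvLoopA_eq sep cs out [] 0 false false (fun _ => rfl)]
    rw [pvLoopB]
    cases hg : pvSplitOnce sep 0 false false cs with
    | none => simp [pvFinishA]
    | some pr =>
      obtain ⟨p, r⟩ := pr
      have hlt : r.length ≤ fuel :=
        Nat.le_of_lt_succ (Nat.lt_of_lt_of_le (pvSplitOnce_length hg) hlen)
      simpa using ih r (out ++ [PySem.Str.strip (String.mk p)]) hlt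

-- ===== VERDICT (by name: the statement is the Claim_ definition above) =====
theorem split_top_py_spec : Claim_equal_split_top_py := by
  intro s sep _
  show split_top_py s sep = split_top_py_alt s sep
  unfold split_top_py split_top_py_alt
  exact pvLoopAB sep s.toList.length s.toList [] le_rfl
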